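-- pv_equiv track=rewrite | github.com/codedstructure/aoc2023 | day18/step1.py | steps
-- ===== SOURCE A (Python) =====
-- def steps(pos, dir, count):
--     for _ in range(count):
--         if dir == 'U':
--             pos = (pos[0], pos[1] - 1)
--         elif dir == 'D':
--             pos = (pos[0], pos[1] + 1)
--         elif dir == 'L':
--             pos = (pos[0] - 1, pos[1])
--         elif dir == 'R':
--             pos = (pos[0] + 1, pos[1])
--         yield pos
-- ===== SOURCE B (Python) =====
-- def steps(pos, dir, count):
--     dx, dy = {'U': (0, -1), 'D': (0, 1), 'L': (-1, 0), 'R': (1, 0)}.get(dir, (0, 0))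
--     for i in range(1, count + 1):
--         yield (pos[0] + dx * i, pos[1] + dy * i)
-- ===== Notes on version B (the rewrite author's own statement) =====
-- stated objective: alternative
-- what changed: B replaces A's step-by-step position accumulation with a dict lookup of the unit step (dx, dy) (defaulting to (0, 0) for unrecognized directions) and computes each yielded position in closed form from the original pos and the index i.
import Mathlib
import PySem

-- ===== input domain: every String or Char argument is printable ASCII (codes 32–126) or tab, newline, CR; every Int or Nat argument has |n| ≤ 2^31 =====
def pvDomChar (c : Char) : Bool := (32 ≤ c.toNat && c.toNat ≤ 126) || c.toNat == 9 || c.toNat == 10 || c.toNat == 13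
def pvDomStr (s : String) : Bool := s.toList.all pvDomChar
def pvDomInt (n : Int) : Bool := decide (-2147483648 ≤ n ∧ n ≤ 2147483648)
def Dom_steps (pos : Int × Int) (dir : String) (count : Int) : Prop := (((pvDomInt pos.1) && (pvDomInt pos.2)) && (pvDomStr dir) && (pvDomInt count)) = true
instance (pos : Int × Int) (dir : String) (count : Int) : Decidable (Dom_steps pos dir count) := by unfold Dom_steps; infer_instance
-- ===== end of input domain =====

-- B computes each yielded position in closed form (unit step from a dict × index) instead of A's accumulator threading; objective: alternative.


-- ===== PORT A =====
def steps (pos : Int × Int) (dir : String) (count : Int) : List (Int × Int) :=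
  ((PySem.List.pyRange 0 count 1).foldl
    (fun (st : (Int × Int) × List (Int × Int)) _ =>
      let p := st.1
      let p :=
        if dir == "U" then (p.1, p.2 - 1)
        else if dir == "D" then (p.1, p.2 + 1)
        else if dir == "L" then (p.1 - 1, p.2)
        else if dir == "R" then (p.1 + 1, p.2)
        else p
      (p, st.2 ++ [p]))
    (pos, [])).2

-- ===== PORT B =====
def steps_alt (pos : Int × Int) (dir : String) (count : Int) : List (Int × Int) :=
  let d := PySem.Dict.getD
    (PySem.Dict.ofList [("U", ((0 : Int), (-1 : Int))), ("D", (0, 1)), ("L", (-1, 0)), ("R", (1, 0))])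
    dir ((0 : Int), (0 : Int))
  (PySem.List.pyRange 1 (count + 1) 1).map (fun i => (pos.1 + d.1 * i, pos.2 + d.2 * i))

-- ===== PRECONDITION & SPEC =====
def Spec_steps (pos : Int × Int) (dir : String) (count : Int) (out : List (Int × Int)) : Prop := out = steps_alt pos dir count
instance (pos : Int × Int) (dir : String) (count : Int) (out : List (Int × Int)) : Decidable (Spec_steps pos dir count out) := by unfold Spec_steps; infer_instance

-- ===== CLAIM (what is proved, stated in full; the proofs are below) =====
def Claim_equal_steps : Prop := ∀ (pos : Int × Int) (dir : String) (count : Int), Dom_steps pos dir count → Spec_steps pos dir count (steps pos dir count)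

-- ===== LEMMAS AND PROOFS =====

-- A's loop body, once the direction is fixed, adds a constant offset each iteration.
theorem steps_loop (dx dy : Int) (pos : Int × Int) (l : List Int) (acc : List (Int × Int)) :
    (l.foldl
      (fun (st : (Int × Int) × List (Int × Int)) _ =>
        ((st.1.1 + dx, st.1.2 + dy), st.2 ++ [(st.1.1 + dx, st.1.2 + dy)]))
      (pos, acc)).2
    = acc ++ (List.range l.length).map
        (fun (k : Nat) => (pos.1 + dx * ((k : Int) + 1), pos.2 + dy * ((k : Int) + 1))) := by
  induction l generalizing pos acc with
  | nil => simp
  | cons x t ih =>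
      rw [List.foldl_cons, ih]
      rw [List.length_cons, List.range_succ_eq_map, List.map_cons, List.map_map]
      simp only [List.append_assoc, List.singleton_append]
      congr 1
      congr 1
      · simp
      · apply List.map_congr_left
        intro k _
        simp only [Function.comp_apply, Prod.mk.injEq]
        push_cast
        constructor <;> ring

theorem steps_eq_closed (pos : Int × Int) (dir : String) (count : Int) (dx dy : Int)
    (hstep : ∀ p : Int × Int,
        (if dir == "U" then (p.1, p.2 - 1)
        else if dir == "D" then (p.1, p.2 + 1)
        else if dir == "L" then (p.1 - 1, p.2)
        else if dir == "R" then (p.1 + 1, p.2)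
        else p) = (p.1 + dx, p.2 + dy)) :
    steps pos dir count
    = (List.range count.toNat).map
        (fun (k : Nat) => (pos.1 + dx * ((k : Int) + 1), pos.2 + dy * ((k : Int) + 1))) := by
  unfold steps
  simp only [hstep]
  rw [steps_loop]
  simp [PySem.List.length_pyRange_one]

theorem steps_alt_eq_closed (pos : Int × Int) (dir : String) (count : Int) (d : Int × Int)
    (hd : PySem.Dict.getD
        (PySem.Dict.ofList [("U", ((0 : Int), (-1 : Int))), ("D", (0, 1)), ("L", (-1, 0)), ("R", (1, 0))])
        dir ((0 : Int), (0 : Int)) = d) :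
    steps_alt pos dir count
    = (List.range count.toNat).map
        (fun (k : Nat) => (pos.1 + d.1 * ((k : Int) + 1), pos.2 + d.2 * ((k : Int) + 1))) := by
  unfold steps_alt
  rw [hd, PySem.List.pyRange_one]
  have hn : (count + 1 - 1).toNat = count.toNat := by omega
  rw [hn, List.map_map]
  apply List.map_congr_left
  intro k _
  simp only [Function.comp_apply, Prod.mk.injEq]
  constructor <;> ring

theorem steps_spec_aux (pos : Int × Int) (dir : String) (count : Int) :
    steps pos dir count = steps_alt pos dir count := by
  by_cases hU : dir = "U"
  · subst hU
    rw [steps_eq_closed pos _ count 0 (-1) (by intro p; simp; ring),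
        steps_alt_eq_closed pos _ count (0, -1) (by decide)]
  · by_cases hD : dir = "D"
    · subst hD
      rw [steps_eq_closed pos _ count 0 1 (by intro p; simp),
          steps_alt_eq_closed pos _ count (0, 1) (by decide)]
    · by_cases hL : dir = "L"
      · subst hL
        rw [steps_eq_closed pos _ count (-1) 0 (by intro p; simp; ring),
            steps_alt_eq_closed pos _ count (-1, 0) (by decide)]
      · by_cases hR : dir = "R"
        · subst hR
          rw [steps_eq_closed pos _ count 1 0 (by intro p; simp),
              steps_alt_eq_closed pos _ count (1, 0) (by decide)]
        · have h1 : ("U" == dir) = false := beq_eq_false_iff_ne.mpr (Ne.symm hU)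
          have h2 : ("D" == dir) = false := beq_eq_false_iff_ne.mpr (Ne.symm hD)
          have h3 : ("L" == dir) = false := beq_eq_false_iff_ne.mpr (Ne.symm hL)
          have h4 : ("R" == dir) = false := beq_eq_false_iff_ne.mpr (Ne.symm hR)
          have hd : PySem.Dict.getD
              (PySem.Dict.ofList [("U", ((0 : Int), (-1 : Int))), ("D", (0, 1)), ("L", (-1, 0)), ("R", (1, 0))])
              dir ((0 : Int), (0 : Int)) = (0, 0) := by
            simp [PySem.Dict.getD, PySem.Dict.get?, PySem.Dict.ofList, PySem.Dict.update,
                  PySem.Dict.insert, PySem.Dict.empty, h1, h2, h3, h4]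
          rw [steps_eq_closed pos _ count 0 0 (by intro p; simp [hU, hD, hL, hR]),
              steps_alt_eq_closed pos _ count (0, 0) hd]

-- ===== VERDICT (by name: the statement is the Claim_ definition above) =====
theorem steps_spec : Claim_equal_steps := by
  intro pos dir count _
  unfold Spec_steps
  exact steps_spec_aux pos dir count
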